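-- pv_equiv track=rewrite | github.com/pypi-data/pypi-mirror-69 | packages/terramare/terramare-0.3.6.tar.gz/terramare-0.3.6/src/terramare/iterator_utils.py | zip_strict_dict_extra
-- ===== SOURCE A (Python) =====
-- from typing import (
--     Callable,
--     Dict,
--     Iterator,
--     List,
--     Mapping,
--     Optional,
--     Sequence,
--     Set,
--     Tuple,
--     Type,
--     TypeVar,
--     Union,
-- )
--
-- T = TypeVar("T")
--
-- S = TypeVar("S")
--
-- def zip_strict_dict(
--     required_ts: Mapping[str, T], optional_ts: Mapping[str, T], ss: Mapping[str, S]
-- ) -> Dict[str, Tuple[T, S]]: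
--     """Zip two dictionaries, raising if they do not contain the same keys."""
--
--     def show_if(msg: str, keys: Set[str]) -> Optional[str]:
--         return msg.format(", ".join(keys)) if keys else None
--
--     missing_keys = show_if("missing keys '{}'", set(required_ts) - set(ss))
--     ts = {**required_ts, **optional_ts}
--     unexpected_keys = show_if("unexpected keys '{}'", set(ss) - set(ts))
--     if missing_keys or unexpected_keys:
--         raise ValueError(
--             "key mismatch - {}".format(
--                 ", ".join((msg for msg in (missing_keys, unexpected_keys) if msg))
--             )
--         )
--     return {k: (ts[k], ss[k]) for k in ss}
--
-- def zip_strict_dict_extra(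
--     t: T,
--     required_ts: Mapping[str, T],
--     optional_ts: Mapping[str, T],
--     ss: Mapping[str, S],
-- ) -> Dict[str, Tuple[T, S]]:
--     """
--     Zip two dictionaries, raising if the first contains keys not present in the second.
--
--     If the second contains keys not present in the first, extend the first with copies of t.
--     """
--     return zip_strict_dict(
--         required_ts,
--         {
--             **optional_ts,
--             **{k: t for k in ss if k not in required_ts and k not in optional_ts},
--         },
--         ss,
--     )
-- ===== SOURCE B (Python) =====
-- def zip_strict_dict_extra(t, required_ts, optional_ts, ss):
--     missing = set(required_ts) - set(ss)
--     if missing: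
--         raise ValueError(
--             "key mismatch - missing keys '{}'".format(", ".join(missing))
--         )
--     result = {}
--     for k, s in ss.items():
--         value = (
--             optional_ts[k]
--             if k in optional_ts
--             else required_ts[k] if k in required_ts else t
--         )
--         result[k] = (value, s)
--     return result
-- ===== Notes on version B (the rewrite author's own statement) =====
-- stated objective: simpler
-- what changed: B drops A's helper delegation, the merged ts dict, the extras dict and the provably dead unexpected-keys check, doing one missing-keys test and then a single pass over ss.items() picking optional/required/default per key.
import Mathlib
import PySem

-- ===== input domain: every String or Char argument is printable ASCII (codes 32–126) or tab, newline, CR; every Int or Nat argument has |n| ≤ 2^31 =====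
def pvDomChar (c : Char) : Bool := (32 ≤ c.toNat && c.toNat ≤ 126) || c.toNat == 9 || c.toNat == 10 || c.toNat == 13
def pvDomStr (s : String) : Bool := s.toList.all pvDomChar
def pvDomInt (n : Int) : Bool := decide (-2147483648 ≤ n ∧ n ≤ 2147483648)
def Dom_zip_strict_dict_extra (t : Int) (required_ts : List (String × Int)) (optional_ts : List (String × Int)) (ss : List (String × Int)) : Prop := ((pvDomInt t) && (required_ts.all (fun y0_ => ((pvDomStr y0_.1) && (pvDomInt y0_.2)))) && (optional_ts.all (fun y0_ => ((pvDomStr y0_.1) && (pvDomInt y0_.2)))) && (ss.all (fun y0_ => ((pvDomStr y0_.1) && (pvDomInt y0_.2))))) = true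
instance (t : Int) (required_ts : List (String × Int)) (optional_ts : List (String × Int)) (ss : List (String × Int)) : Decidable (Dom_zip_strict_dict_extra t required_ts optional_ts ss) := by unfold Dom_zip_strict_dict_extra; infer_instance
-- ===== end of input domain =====

-- B inlines A's helper delegation into one missing-keys check plus a single pass over ss.items()
-- choosing optional/required/default per key, dropping A's merged ts dict, extras dict and the
-- provably dead unexpected-keys check (objective: simpler).

-- ===== PORT A =====
-- Transliteration of zip_strict_dict_extra + its helper zip_strict_dict.
-- Dict-typed Python parameters arrive as assoc lists; PySem.Dict.ofList is dict(pairs).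
def zip_strict_dict_extra (t : Int) (required_ts : List (String × Int)) (optional_ts : List (String × Int)) (ss : List (String × Int)) : List (String × Int × Int) :=
  let reqD := PySem.Dict.ofList required_ts
  let optD := PySem.Dict.ofList optional_ts
  let ssD := PySem.Dict.ofList ss
  -- {k: t for k in ss if k not in required_ts and k not in optional_ts}
  let extra : PySem.Dict String Int :=
    ssD.keys.foldl (fun d k => if !reqD.contains k && !optD.contains k then d.insert k t else d) PySem.Dict.empty
  -- {**optional_ts, **extra}  (the second argument passed on to zip_strict_dict)
  let optD' := optD.update extra.items
  -- body of zip_strict_dict (required_ts, optD', ss):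
  let missing : PySem.Set String := (PySem.Set.ofList reqD.keys).diff (PySem.Set.ofList ssD.keys)
  -- ts = {**required_ts, **optional_ts}
  let ts := reqD.update optD'.items
  let unexpected : PySem.Set String := (PySem.Set.ofList ssD.keys).diff (PySem.Set.ofList ts.keys)
  if missing ≠ [] ∨ unexpected ≠ [] then
    []  -- Python raises ValueError here; these inputs are excluded by Pre_
  else
    -- {k: (ts[k], ss[k]) for k in ss}; both lookups always hit, getD's default is never used
    ssD.keys.foldl (fun acc k => acc ++ [(k, (ts.getD k 0, ssD.getD k 0))]) []

-- ===== PORT B =====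
def zip_strict_dict_extra_alt (t : Int) (required_ts : List (String × Int)) (optional_ts : List (String × Int)) (ss : List (String × Int)) : List (String × Int × Int) :=
  let reqD := PySem.Dict.ofList required_ts
  let optD := PySem.Dict.ofList optional_ts
  let ssD := PySem.Dict.ofList ss
  -- missing = set(required_ts) - set(ss)
  let missing : PySem.Set String := (PySem.Set.ofList reqD.keys).diff (PySem.Set.ofList ssD.keys)
  if missing ≠ [] then
    []  -- Python raises ValueError here; these inputs are excluded by Pre_
  else
    -- for k, s in ss.items(): result[k] = (optional_ts[k] if k in optional_ts else required_ts[k] if k in required_ts else t, s)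
    ssD.items.foldl (fun acc p =>
      acc ++ [(p.1, ((if optD.contains p.1 then optD.getD p.1 0
                      else if reqD.contains p.1 then reqD.getD p.1 0 else t), p.2))]) []

-- ===== PRECONDITION & SPEC =====
-- Pre_ excludes exactly the inputs where A raises ValueError (some required key absent from ss).
def Pre_zip_strict_dict_extra (t : Int) (required_ts : List (String × Int)) (optional_ts : List (String × Int)) (ss : List (String × Int)) : Prop :=
  ∀ p ∈ required_ts, ∃ q ∈ ss, q.1 = p.1
instance (t : Int) (required_ts : List (String × Int)) (optional_ts : List (String × Int)) (ss : List (String × Int)) : Decidable (Pre_zip_strict_dict_extra t required_ts optional_ts ss) := by unfold Pre_zip_strict_dict_extra; infer_instance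

def pvWitness_zip_strict_dict_extra : Int × (List (String × Int)) × (List (String × Int)) × (List (String × Int)) :=
  (7, [("a", 1)], [("b", 2)], [("a", 3), ("b", 4), ("c", 5)])

def Spec_zip_strict_dict_extra (t : Int) (required_ts : List (String × Int)) (optional_ts : List (String × Int)) (ss : List (String × Int)) (out : List (String × Int × Int)) : Prop := out = zip_strict_dict_extra_alt t required_ts optional_ts ss
instance (t : Int) (required_ts : List (String × Int)) (optional_ts : List (String × Int)) (ss : List (String × Int)) (out : List (String × Int × Int)) : Decidable (Spec_zip_strict_dict_extra t required_ts optional_ts ss out) := by unfold Spec_zip_strict_dict_extra; infer_instance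

-- ===== CLAIM (what is proved, stated in full; the proofs are below) =====
def Claim_equal_zip_strict_dict_extra : Prop := ∀ (t : Int) (required_ts : List (String × Int)) (optional_ts : List (String × Int)) (ss : List (String × Int)), Dom_zip_strict_dict_extra t required_ts optional_ts ss → Pre_zip_strict_dict_extra t required_ts optional_ts ss → Spec_zip_strict_dict_extra t required_ts optional_ts ss (zip_strict_dict_extra t required_ts optional_ts ss)

-- ===== LEMMAS AND PROOFS =====

-- lookup in a Python dict-merge {**d, **(dict with items l)}: the updating pairs win
theorem get?_update_nodup (d : PySem.Dict String Int) (l : List (String × Int))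
    (h : (l.map Prod.fst).Nodup) (k : String) :
    (d.update l).get? k = ((PySem.Dict.mk l).get? k).or (d.get? k) := by
  induction l generalizing d with
  | nil => simp [PySem.Dict.update, PySem.Dict.get?_empty]; rfl
  | cons p rest ih =>
    simp only [List.map_cons, List.nodup_cons] at h
    have step : (d.update (p :: rest)) = (d.insert p.1 p.2).update rest := rfl
    rw [step, ih _ h.2, PySem.Dict.get?_mk_cons]
    by_cases hk : p.1 = k
    · subst hk
      have hnone : (PySem.Dict.mk rest).get? p.1 = none := by
        rw [PySem.Dict.get?_eq_none_iff_not_mem_keys, PySem.Dict.keys_mk]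
        exact h.1
      simp [hnone, PySem.Dict.get?_insert_self]
    · have : (d.insert p.1 p.2).get? k = d.get? k :=
        PySem.Dict.get?_insert_of_ne d _ (fun he => hk he.symm)
      simp [this, beq_iff_eq, hk]

-- lookup in the guarded-insert loop building A's extras dict
theorem get?_extra_loop (cond : String → Bool) (t : Int) (l : List String)
    (d : PySem.Dict String Int) (k : String) :
    (l.foldl (fun d x => if cond x then d.insert x t else d) d).get? k
      = if cond k ∧ k ∈ l then some t else d.get? k := by
  induction l generalizing d with
  | nil => simp
  | cons x rest ih =>
    simp only [List.foldl_cons]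
    rw [ih]
    by_cases hmem : cond k ∧ k ∈ rest
    · simp [hmem, hmem.2]
    · by_cases hk : k = x
      · subst hk
        by_cases hc : cond k
        · simp [hmem, hc, PySem.Dict.get?_insert_self]
        · simp [hmem, hc]
      · have hne : (if cond x then d.insert x t else d).get? k = d.get? k := by
          split
          · exact PySem.Dict.get?_insert_of_ne d _ hk
          · rfl
        have hno : ¬ (cond k = true ∧ k ∈ x :: rest) := by
          rintro ⟨hc, hx⟩
          rcases List.mem_cons.mp hx with h | h
          · exact hk h
          · exact hmem ⟨hc, h⟩
        simp only [List.mem_cons] at hno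
        simp [hne, hmem, hno]

-- keys of dict(pairs) are the first occurrences of the pair keys
theorem mem_keys_ofList (l : List (String × Int)) (k : String) :
    k ∈ (PySem.Dict.ofList l).keys ↔ k ∈ l.map Prod.fst := by
  show k ∈ (PySem.Dict.empty.update l).keys ↔ _
  rw [show (PySem.Dict.empty.update l : PySem.Dict String Int)
        = l.foldl (fun d p => d.insert p.1 p.2) PySem.Dict.empty from rfl]
  rw [PySem.Dict.keys_foldl_insert_key l Prod.fst (fun _ p => p.2) PySem.Dict.empty]
  rw [show (PySem.Dict.empty : PySem.Dict String Int).keys = [] from rfl]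
  rw [PySem.Set.mem_update]
  simp

-- any conditional-insert loop from a nodup-keys start keeps keys nodup
theorem nodup_keys_extra_loop (cond : String → Bool) (t : Int) (l : List String)
    (d : PySem.Dict String Int) (h : d.keys.Nodup) :
    (l.foldl (fun d x => if cond x then d.insert x t else d) d).keys.Nodup := by
  induction l generalizing d with
  | nil => exact h
  | cons x rest ih =>
    simp only [List.foldl_cons]
    apply ih
    split
    · exact PySem.Dict.nodup_keys_insert d x t h
    · exact h

-- ===== VERDICT (by name: the statement is the Claim_ definition above) =====
theorem zip_strict_dict_extra_spec : Claim_equal_zip_strict_dict_extra := by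
  intro t required_ts optional_ts ss _hdom hpre
  unfold Spec_zip_strict_dict_extra zip_strict_dict_extra zip_strict_dict_extra_alt
  dsimp only
  set reqD := PySem.Dict.ofList required_ts with hreq
  set optD := PySem.Dict.ofList optional_ts with hopt
  set ssD := PySem.Dict.ofList ss with hss
  set cond : String → Bool := fun k => !reqD.contains k && !optD.contains k with hcond
  set extra := ssD.keys.foldl (fun d k => if cond k then d.insert k t else d) PySem.Dict.empty with hextra
  set optD' := optD.update extra.items with hoptD'
  set ts := reqD.update optD'.items with hts
  have h_nodup_ss : ssD.keys.Nodup := PySem.Dict.nodup_keys_ofList ss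
  -- lookups through the merge chain
  have h_extra : ∀ k, extra.get? k
      = if cond k = true ∧ k ∈ ssD.keys then some t else none := by
    intro k
    rw [hextra, get?_extra_loop]
    simp [PySem.Dict.get?_empty]
  have h_opt' : ∀ k, optD'.get? k = ((extra.get? k).or (optD.get? k)) := by
    intro k
    have hnd : (extra.items.map Prod.fst).Nodup := by
      have := nodup_keys_extra_loop cond t ssD.keys PySem.Dict.empty
        (by rw [PySem.Dict.keys_empty]; exact List.nodup_nil)
      simpa [PySem.Dict.keys] using this
    rw [hoptD', get?_update_nodup optD extra.items hnd k]
  have h_ts : ∀ k, ts.get? k = ((optD'.get? k).or (reqD.get? k)) := by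
    intro k
    have hnd : (optD'.items.map Prod.fst).Nodup := by
      have := PySem.Dict.nodup_keys_update optD extra.items (PySem.Dict.nodup_keys_ofList optional_ts)
      simpa [PySem.Dict.keys, hoptD'] using this
    rw [hts, get?_update_nodup reqD optD'.items hnd k]
  -- per-key value: A's merged ts agrees with B's three-way choice on every ss key
  have h_val : ∀ k ∈ ssD.keys, ts.get? k
      = some (if optD.contains k then optD.getD k 0
              else if reqD.contains k then reqD.getD k 0 else t) := by
    intro k hk
    rw [h_ts, h_opt', h_extra]
    by_cases hco : optD.contains k = true
    · have hs : (optD.get? k).isSome = true := by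
        rw [← PySem.Dict.contains_eq_isSome_get? optD k]; exact hco
      obtain ⟨v, hv⟩ := Option.isSome_iff_exists.mp hs
      have : cond k = false := by simp [hcond, hco]
      simp [this, hv, hco, PySem.Dict.getD_of_get?_eq_some optD 0 hv]
    · have hnone : optD.get? k = none := by
        cases h : optD.get? k with
        | none => rfl
        | some v => exact absurd (by rw [PySem.Dict.contains_eq_isSome_get?, h]; rfl) hco
      by_cases hcr : reqD.contains k = true
      · have hs : (reqD.get? k).isSome = true := by
          rw [← PySem.Dict.contains_eq_isSome_get? reqD k]; exact hcr
        obtain ⟨v, hv⟩ := Option.isSome_iff_exists.mp hs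
        have : cond k = false := by simp [hcond, hcr]
        simp [this, hnone, hv, hco, hcr, PySem.Dict.getD_of_get?_eq_some reqD 0 hv]
      · have : cond k = true := by
          simp only [hcond, Bool.and_eq_true, Bool.not_eq_true']
          exact ⟨by simpa using hcr, by simpa using hco⟩
        simp [this, hk, hco, hcr]
  -- A never reaches the unexpected-keys branch
  have h_unexp : ((PySem.Set.ofList ssD.keys).diff (PySem.Set.ofList ts.keys) : PySem.Set String) = [] := by
    rw [List.eq_nil_iff_forall_not_mem]
    intro x hx
    rw [PySem.Set.mem_diff] at hx
    obtain ⟨hx1, hx2⟩ := hx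
    rw [PySem.Set.mem_ofList] at hx1 hx2
    apply hx2
    by_contra hxk
    exact absurd (h_val x hx1) (by rw [(PySem.Dict.get?_eq_none_iff_not_mem_keys ts x).mpr hxk]; simp)
  -- Pre_ says exactly that the missing-keys set is empty
  have h_missing : ((PySem.Set.ofList reqD.keys).diff (PySem.Set.ofList ssD.keys) : PySem.Set String) = [] := by
    rw [List.eq_nil_iff_forall_not_mem]
    intro x hx
    rw [PySem.Set.mem_diff] at hx
    obtain ⟨hx1, hx2⟩ := hx
    rw [PySem.Set.mem_ofList] at hx1 hx2
    apply hx2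
    rw [hss, mem_keys_ofList]
    rw [hreq, mem_keys_ofList] at hx1
    obtain ⟨p, hp, hp1⟩ := List.mem_map.mp hx1
    obtain ⟨q, hq, hq1⟩ := hpre p hp
    exact List.mem_map.mpr ⟨q, hq, by rw [hq1, hp1]⟩
  rw [if_neg (by simp [h_missing, h_unexp]), if_neg (by simp [h_missing])]
  rw [PySem.List.foldl_append_singleton_eq_map
        (fun k => (k, (ts.getD k 0, ssD.getD k 0))) ssD.keys []]
  rw [PySem.List.foldl_append_singleton_eq_map
        (fun p => (p.1, ((if optD.contains p.1 then optD.getD p.1 0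
                  else if reqD.contains p.1 then reqD.getD p.1 0 else t), p.2))) ssD.items []]
  rw [PySem.Dict.items_eq_map_keys ssD h_nodup_ss 0, List.map_map]
  simp only [List.nil_append]
  apply List.map_congr_left
  intro k hk
  simp only [Function.comp]
  rw [PySem.Dict.getD_of_get?_eq_some ts 0 (h_val k hk)]
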